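-- pv_equiv track=rewrite | github.com/cecilia-uu/LeetCode | OA/meta/16_retail_store.py | solution
-- ===== SOURCE A (Python) =====
-- from collections import defaultdict
--
-- def solution(salesData, frequencyThreshold) -> int:
--     l = 0
--     n = len(salesData)
--     frequency = defaultdict(int)
--     ans = 0
--
--     for r in range(n):
--         frequency[salesData[r]] += 1
--
--         while frequency[salesData[r]] > frequencyThreshold:
--             frequency[salesData[l]] -= 1
--             if frequency[salesData[l]] == 0:
--                 del frequency[salesData[l]]
--             l += 1
--         ans = max(ans, r - l + 1)
--
--     return ans
-- ===== SOURCE B (Python) =====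
-- def solution(salesData, frequencyThreshold) -> int:
--     # per-value occurrence lists with a direct left-pointer jump instead of a
--     # live count map and an inner shrink-while
--     positions = {}
--     l = 0
--     ans = 0
--     for r, v in enumerate(salesData):
--         occ = positions.get(v, [])
--         occ.append(r)
--         positions[v] = occ
--         if len(occ) > frequencyThreshold:
--             l = max(l, occ[-frequencyThreshold - 1] + 1)
--         ans = max(ans, r - l + 1)
--     return ans
-- ===== Notes on version B (the rewrite author's own statement) =====
-- stated objective: alternative
-- what changed: Replaces the live count map plus inner shrink-while loop by per-value occurrence-index lists and a direct left-pointer jump to one past the (threshold+1)-th most recent occurrence.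
import Mathlib
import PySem

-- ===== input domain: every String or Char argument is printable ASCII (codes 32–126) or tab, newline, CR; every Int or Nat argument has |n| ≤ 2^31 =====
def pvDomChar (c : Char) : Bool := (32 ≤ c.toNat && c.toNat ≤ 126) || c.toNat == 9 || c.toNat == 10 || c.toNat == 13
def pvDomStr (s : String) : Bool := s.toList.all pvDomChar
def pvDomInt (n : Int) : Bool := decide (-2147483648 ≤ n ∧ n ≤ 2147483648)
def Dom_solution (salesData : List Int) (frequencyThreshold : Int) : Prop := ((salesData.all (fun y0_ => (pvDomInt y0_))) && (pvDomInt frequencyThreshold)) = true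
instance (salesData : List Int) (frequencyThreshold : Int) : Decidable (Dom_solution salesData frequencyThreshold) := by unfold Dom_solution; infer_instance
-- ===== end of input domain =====

-- B replaces A's live count map with its inner shrink-while loop by per-value
-- occurrence-index lists with a direct left-pointer jump (alternative algorithm,
-- same asymptotic cost).

-- ===== PORT A =====
-- the inner 'while frequency[salesData[r]] > frequencyThreshold' loop; `fuel` is only a
-- totality guard (on inputs satisfying Pre_ the loop runs at most salesData.length times
-- per call, so the fuel n + 1 is never exhausted)
def solutionShrink (salesData : List Int) (frequencyThreshold : Int) (x : Int) :
    Nat → Int → PySem.Dict Int Int → Int × PySem.Dict Int Int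
  | 0, l, freq => (l, freq)
  | fuel + 1, l, freq =>
    if freq.getD x 0 > frequencyThreshold then
      let y := PySem.List.pyGetD salesData l 0
      let c := freq.getD y 0 - 1
      let freq' := if c = 0 then (freq.insert y c).erase y else freq.insert y c
      solutionShrink salesData frequencyThreshold x fuel (l + 1) freq'
    else (l, freq)

-- the body of A's 'for r in range(n)' loop
def solutionStep (salesData : List Int) (frequencyThreshold : Int) (n : Nat)
    (st : Int × PySem.Dict Int Int × Int) (r : Int) : Int × PySem.Dict Int Int × Int :=
  let l := st.1
  let freq := st.2.1
  let ans := st.2.2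
  let x := PySem.List.pyGetD salesData r 0
  let freq := freq.insert x (freq.getD x 0 + 1)
  let lf := solutionShrink salesData frequencyThreshold x (n + 1) l freq
  (lf.1, lf.2, max ans (r - lf.1 + 1))

def solution (salesData : List Int) (frequencyThreshold : Int) : Int :=
  let n := salesData.length
  ((PySem.List.pyRange 0 (n : Int) 1).foldl (solutionStep salesData frequencyThreshold n)
    (0, PySem.Dict.empty, 0)).2.2

-- ===== PORT B =====
-- the body of B's 'for r, v in enumerate(salesData)' loop
def solutionAltStep (frequencyThreshold : Int)
    (st : Int × PySem.Dict Int (List Int) × Int) (rv : Int × Int) :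
    Int × PySem.Dict Int (List Int) × Int :=
  let l := st.1
  let positions := st.2.1
  let ans := st.2.2
  let occ := positions.getD rv.2 []
  let occ := occ ++ [rv.1]
  let positions := positions.insert rv.2 occ
  let l := if (occ.length : Int) > frequencyThreshold then
             max l (PySem.List.pyGetD occ (-frequencyThreshold - 1) 0 + 1)
           else l
  (l, positions, max ans (rv.1 - l + 1))

def solution_alt (salesData : List Int) (frequencyThreshold : Int) : Int :=
  ((PySem.List.enumerate salesData).foldl (solutionAltStep frequencyThreshold)
    (0, PySem.Dict.empty, 0)).2.2

-- ===== PRECONDITION & SPEC =====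
-- Pre_ excludes exactly the inputs on which the Python A raises IndexError: with a
-- negative threshold and a non-empty list, A's shrink loop never stops and runs
-- salesData[l] off the end of the list.
def Pre_solution (salesData : List Int) (frequencyThreshold : Int) : Prop :=
  salesData = [] ∨ 0 ≤ frequencyThreshold
instance (salesData : List Int) (frequencyThreshold : Int) : Decidable (Pre_solution salesData frequencyThreshold) := by unfold Pre_solution; infer_instance
def pvWitness_solution : List Int × Int := ([1, 2, 1, 1, 3], 2)

def Spec_solution (salesData : List Int) (frequencyThreshold : Int) (out : Int) : Prop := out = solution_alt salesData frequencyThreshold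
instance (salesData : List Int) (frequencyThreshold : Int) (out : Int) : Decidable (Spec_solution salesData frequencyThreshold out) := by unfold Spec_solution; infer_instance

-- ===== CLAIM (what is proved, stated in full; the proofs are below) =====
def Claim_equal_solution : Prop := ∀ (salesData : List Int) (frequencyThreshold : Int), Dom_solution salesData frequencyThreshold → Pre_solution salesData frequencyThreshold → Spec_solution salesData frequencyThreshold (solution salesData frequencyThreshold)

-- ===== LEMMAS AND PROOFS =====

def cnt (s : List Int) (x : Int) (l hi : Nat) : Nat :=
  (List.range' l (hi - l)).countP (fun i => s.getD i 0 == x)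
def occL (s : List Int) (x : Int) (hi : Nat) : List Nat :=
  (List.range hi).filter (fun i => s.getD i 0 == x)

lemma cnt_succ_hi (s : List Int) (x : Int) {l hi : Nat} (h : l ≤ hi) :
    cnt s x l (hi + 1) = cnt s x l hi + (if s.getD hi 0 = x then 1 else 0) := by
  have h1 : hi + 1 - l = (hi - l) + 1 := by omega
  have h2 : l + (hi - l) = hi := by omega
  simp only [cnt, h1, List.range'_concat, h2, List.countP_append, List.countP_cons,
    List.countP_nil]
  split_ifs <;> simp_all

lemma cnt_cons (s : List Int) (x : Int) {l hi : Nat} (h : l < hi) :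
    cnt s x l hi = (if s.getD l 0 = x then 1 else 0) + cnt s x (l + 1) hi := by
  have h1 : hi - l = (hi - (l+1)) + 1 := by omega
  rw [cnt, h1, List.range'_succ]
  rw [List.countP_cons]
  simp only [cnt]
  split_ifs <;> simp_all <;> omega

lemma cnt_of_le' (s : List Int) (x : Int) {l hi : Nat} (h : hi ≤ l) : cnt s x l hi = 0 := by
  simp [cnt, Nat.sub_eq_zero_of_le h]

lemma cnt_anti (s : List Int) (x : Int) {l l' hi : Nat} (h : l ≤ l') :
    cnt s x l' hi ≤ cnt s x l hi := by
  induction l' with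
  | zero => have : l = 0 := by omega
            simp [this]
  | succ m ih =>
    rcases Nat.eq_or_lt_of_le h with rfl | hlt
    · omega
    rcases Nat.lt_or_ge m hi with hm | hm
    · calc cnt s x (m+1) hi ≤ cnt s x m hi := by rw [cnt_cons s x hm]; omega
        _ ≤ cnt s x l hi := ih (by omega)
    · rw [cnt_of_le' s x (by omega : hi ≤ m+1)]; omega

lemma occL_succ (s : List Int) (x : Int) (hi : Nat) :
    occL s x (hi + 1) = occL s x hi ++ (if s.getD hi 0 = x then [hi] else []) := by
  simp only [occL, List.range_succ, List.filter_append, List.filter_cons, List.filter_nil]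
  split_ifs <;> simp_all

lemma occL_length (s : List Int) (x : Int) (hi : Nat) :
    (occL s x hi).length = cnt s x 0 hi := by
  simp [occL, cnt, ← List.countP_eq_length_filter, List.range_eq_range']

lemma occL_sorted (s : List Int) (x : Int) (hi : Nat) : (occL s x hi).Pairwise (· < ·) := by
  exact (List.pairwise_lt_range).sublist (List.filter_sublist)

lemma occL_mem {s : List Int} {x : Int} {hi i : Nat} (h : i ∈ occL s x hi) :
    i < hi ∧ s.getD i 0 = x := by
  simp only [occL, List.mem_filter, List.mem_range] at h
  exact ⟨h.1, by simpa using h.2⟩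

lemma cnt_eq_filter (s : List Int) (x : Int) (hi : Nat) : ∀ l,
    cnt s x l hi = ((occL s x hi).filter (fun i => l ≤ i)).length := by
  induction hi with
  | zero => intro l; simp [cnt_of_le', occL]
  | succ hi ih =>
    intro l
    rw [occL_succ, List.filter_append, List.length_append]
    by_cases hl : l ≤ hi
    · rw [cnt_succ_hi s x hl, ih l]
      split_ifs with hx <;> simp [hl]
    · rw [cnt_of_le' s x (by omega)]
      have h1 : (occL s x hi).filter (fun i => l ≤ i) = [] := by
        rw [List.filter_eq_nil_iff]
        intro a ha
        have := (occL_mem ha).1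
        simp; omega
      have h2 : ¬ l ≤ hi := by omega
      split_ifs with hx <;> simp [h1, h2]

lemma take_filter_ge (L : List Nat) (hs : L.Pairwise (· < ·)) {k : Nat} (hk : k < L.length) :
    (L.take k).filter (fun i => L[k] ≤ i) = [] := by
  rw [List.pairwise_iff_getElem] at hs
  rw [List.filter_eq_nil_iff]
  intro a ha
  rw [List.mem_iff_getElem] at ha
  obtain ⟨j, hj, rfl⟩ := ha
  have hjk : j < k := by simp at hj; omega
  have hjL : j < L.length := by omega
  have := hs j k hjL hk hjk
  simp [List.getElem_take]
  omega

lemma drop_filter_ge (L : List Nat) (hs : L.Pairwise (· < ·)) {k : Nat} (hk : k < L.length) :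
    (L.drop k).filter (fun i => L[k] ≤ i) = L.drop k := by
  rw [List.pairwise_iff_getElem] at hs
  rw [List.filter_eq_self]
  intro a ha
  rw [List.mem_iff_getElem] at ha
  obtain ⟨j, hj, rfl⟩ := ha
  have hjL : k + j < L.length := by simp at hj; omega
  rcases Nat.eq_zero_or_pos j with rfl | hj0
  · simp
  · have := hs k (k + j) hk hjL (by omega)
    simp [List.getElem_drop]
    omega

lemma cnt_at_index (s : List Int) (x : Int) {hi k : Nat} (hk : k < (occL s x hi).length) :
    cnt s x ((occL s x hi)[k]) hi = (occL s x hi).length - k := by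
  rw [cnt_eq_filter]
  have hsplit : (occL s x hi).filter (fun i => (occL s x hi)[k] ≤ i) =
      ((occL s x hi).take k ++ (occL s x hi).drop k).filter
        (fun i => (occL s x hi)[k] ≤ i) := by
    rw [List.take_append_drop]
  rw [hsplit, List.filter_append, take_filter_ge _ (occL_sorted s x hi) hk,
    drop_filter_ge _ (occL_sorted s x hi) hk]
  simp

def leastL (s : List Int) (x t : Int) (l hi : Nat) : Nat :=
  if h : hi ≤ l then l
  else if (cnt s x l hi : Int) ≤ t then l
  else leastL s x t (l + 1) hi
termination_by hi - l
decreasing_by omega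

lemma leastL_eq_of (s : List Int) (x t : Int) {l hi w : Nat}
    (hlw : l ≤ w) (hw : w ≤ hi) (hcnt : (cnt s x w hi : Int) ≤ t)
    (hmin : ∀ j, l ≤ j → j < w → ¬ (cnt s x j hi : Int) ≤ t) :
    leastL s x t l hi = w := by
  fun_induction leastL s x t l hi with
  | case1 l h => omega
  | case2 l h hc =>
    by_contra hne
    exact hmin l (le_refl l) (by omega) hc
  | case3 l h hc ih =>
    have hlw' : l + 1 ≤ w := by
      rcases Nat.eq_or_lt_of_le hlw with rfl | h2
      · exact absurd hcnt hc
      · omega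
    exact ih hlw' (fun j hj hjw => hmin j (by omega) hjw)


lemma find?_filter_ne (items : List (Int × Int)) (k k' : Int) (h : k' ≠ k) :
    (items.filter (fun p => !p.1 == k)).find? (fun p => p.1 == k') =
      items.find? (fun p => p.1 == k') := by
  induction items with
  | nil => rfl
  | cons p rest ih =>
    obtain ⟨pk, pv⟩ := p
    by_cases hpk : pk = k
    · subst hpk
      simp [List.filter_cons, List.find?_cons, Ne.symm h, ih]
    · by_cases hpk' : pk = k'
      · subst hpk'
        simp [List.filter_cons, List.find?_cons, hpk]
      · simp [List.filter_cons, List.find?_cons, hpk, hpk', ih]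

lemma find?_filter_self (items : List (Int × Int)) (k : Int) :
    (items.filter (fun p => !p.1 == k)).find? (fun p => p.1 == k) = none := by
  rw [List.find?_eq_none]
  intro p hp
  have := List.of_mem_filter hp
  simpa using this

lemma getD_erase_self (d : PySem.Dict Int Int) (k : Int) : (d.erase k).getD k 0 = 0 := by
  have := find?_filter_self d.items k
  simp only [PySem.Dict.getD, PySem.Dict.get?, PySem.Dict.erase] at *
  rw [this]
  rfl

lemma getD_erase_of_ne (d : PySem.Dict Int Int) {k k' : Int} (h : k' ≠ k) :
    (d.erase k).getD k' 0 = d.getD k' 0 := by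
  have := find?_filter_ne d.items k k' h
  simp only [PySem.Dict.getD, PySem.Dict.get?, PySem.Dict.erase] at *
  rw [this]

lemma shrink_spec (s : List Int) (t x : Int) (ht : 0 ≤ t) {hi : Nat} (hhi : hi ≤ s.length) :
    ∀ fuel lN (freq : PySem.Dict Int Int), hi - lN ≤ fuel → lN ≤ hi →
    (∀ v, freq.getD v 0 = (cnt s v lN hi : Int)) →
    (solutionShrink s t x fuel (lN : Int) freq).1 = ((leastL s x t lN hi : Nat) : Int) ∧
    (∀ v, (solutionShrink s t x fuel (lN : Int) freq).2.getD v 0 =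
      (cnt s v (leastL s x t lN hi) hi : Int)) := by
  intro fuel
  induction fuel with
  | zero =>
    intro lN freq hfuel hlN hfreq
    have hle : hi ≤ lN := by omega
    have : leastL s x t lN hi = lN := by rw [leastL]; simp [hle]
    rw [this]
    exact ⟨rfl, hfreq⟩
  | succ fuel ih =>
    intro lN freq hfuel hlN hfreq
    by_cases hc : freq.getD x 0 > t
    · -- loop body runs
      have hcnt : (cnt s x lN hi : Int) > t := by rw [← hfreq]; exact hc
      have hlNlt : lN < hi := by
        by_contra hge
        rw [cnt_of_le' s x (by omega)] at hcnt
        omega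
      -- y = s[lN]
      have hy : PySem.List.pyGetD s (lN : Int) 0 = s.getD lN 0 := by
        simp [PySem.List.pyGetD_natCast]
      have hleast : leastL s x t lN hi = leastL s x t (lN + 1) hi := by
        rw [leastL]; simp [Nat.not_le.mpr hlNlt, not_le.mpr hcnt]
      have hstep : ∀ v, cnt s v lN hi =
          (if s.getD lN 0 = v then 1 else 0) + cnt s v (lN + 1) hi :=
        fun v => cnt_cons s v hlNlt
      -- unfold one iteration
      rw [solutionShrink]
      simp only [if_pos hc]
      have hfreq' : ∀ v,
          (if freq.getD (PySem.List.pyGetD s (lN : Int) 0) 0 - 1 = 0 then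
            (freq.insert (PySem.List.pyGetD s (lN : Int) 0)
              (freq.getD (PySem.List.pyGetD s (lN : Int) 0) 0 - 1)).erase
              (PySem.List.pyGetD s (lN : Int) 0)
          else freq.insert (PySem.List.pyGetD s (lN : Int) 0)
              (freq.getD (PySem.List.pyGetD s (lN : Int) 0) 0 - 1)).getD v 0 =
          (cnt s v (lN + 1) hi : Int) := by
        intro v
        rw [hy]
        by_cases hv : v = s.getD lN 0
        · subst hv
          split_ifs with h0
          · rw [getD_erase_self]
            have := hfreq (s.getD lN 0)
            have h2 := hstep (s.getD lN 0)
            rw [if_pos rfl] at h2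
            omega
          · rw [PySem.Dict.getD_insert_self, hfreq (s.getD lN 0)]
            have h2 := hstep (s.getD lN 0)
            rw [if_pos rfl] at h2
            omega
        · have hne : s.getD lN 0 ≠ v := fun hh => hv hh.symm
          have : cnt s v lN hi = cnt s v (lN + 1) hi := by rw [hstep v, if_neg hne]; simp
          split_ifs with h0
          · rw [getD_erase_of_ne _ hv, PySem.Dict.getD_insert_of_ne _ _ _ hv, hfreq v, this]
          · rw [PySem.Dict.getD_insert_of_ne _ _ _ hv, hfreq v, this]
      have hcast : (lN : Int) + 1 = ((lN + 1 : Nat) : Int) := by push_cast; ring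
      rw [hleast, hcast]
      exact ih (lN + 1) _ (by omega) (by omega) hfreq'
    · -- loop stops
      have hcnt : (cnt s x lN hi : Int) ≤ t := by rw [← hfreq]; omega
      have : leastL s x t lN hi = lN := by
        rw [leastL]
        by_cases hle : hi ≤ lN
        · simp [hle]
        · simp [hle, hcnt]
      rw [solutionShrink]
      simp only [if_neg hc, this]
      exact ⟨trivial, fun v => hfreq v⟩

lemma leastL_bounds (s : List Int) (x t : Int) (l hi : Nat) :
    l ≤ leastL s x t l hi ∧ leastL s x t l hi ≤ max l hi := by
  fun_induction leastL s x t l hi with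
  | case1 l h => omega
  | case2 l h hc => omega
  | case3 l h hc ih => omega

lemma leastL_cnt_le (s : List Int) (x t : Int) (ht : 0 ≤ t) (l hi : Nat) :
    (cnt s x (leastL s x t l hi) hi : Int) ≤ t := by
  fun_induction leastL s x t l hi with
  | case1 l h => rw [cnt_of_le' s x h]; exact ht
  | case2 l h hc => exact hc
  | case3 l h hc ih => exact ih

lemma enumerate_snoc {α : Type} (xs : List α) (x : α) : ∀ s0 : Int,
    PySem.List.enumerate (xs ++ [x]) s0 =
      PySem.List.enumerate xs s0 ++ [(s0 + xs.length, x)] := by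
  induction xs with
  | nil => intro s0; simp [PySem.List.enumerate_cons, PySem.List.enumerate_nil]
  | cons y ys ih =>
    intro s0
    simp only [List.cons_append, PySem.List.enumerate_cons, ih (s0 + 1), List.length_cons]
    congr 2
    push_cast
    ring

lemma jump_eq_least (s : List Int) (x t : Int) (ht : 0 ≤ t) {lN k : Nat}
    (hlN : lN ≤ k) (hx : s.getD k 0 = x)
    (hvalid : (cnt s x lN k : Int) ≤ t) :
    (if (((occL s x (k+1)).map (fun i : Nat => (i : Int))).length : Int) > t then
       max (lN : Int)
         (PySem.List.pyGetD ((occL s x (k+1)).map (fun i : Nat => (i : Int))) (-t-1) 0 + 1)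
     else (lN : Int)) = ((leastL s x t lN (k+1) : Nat) : Int) := by
  have hm : (occL s x (k+1)).length = cnt s x 0 (k+1) := occL_length s x (k+1)
  set m := (occL s x (k+1)).length with hmdef
  by_cases hgt : (m : Int) > t
  · -- at least t+1 occurrences in total
    have htN : ((t.toNat : Nat) : Int) = t := Int.toNat_of_nonneg ht
    have hmt : t.toNat + 1 ≤ m := by omega
    have hkk : m - (t.toNat + 1) < m := by omega
    have hidx : -t - 1 = -(((t.toNat + 1 : Nat) : Nat) : Int) := by
      push_cast
      omega
    have hpy : PySem.List.pyGetD ((occL s x (k+1)).map (fun i : Nat => (i : Int))) (-t-1) 0 =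
        (((occL s x (k+1))[m - (t.toNat + 1)]'(by omega) : Nat) : Int) := by
      rw [hidx, PySem.List.pyGetD_neg_natCast _ (t.toNat + 1) 0 (by omega)
        (by simpa using hmt)]
      simp only [List.length_map]
      rw [List.getElem_map]
    set p := (occL s x (k+1))[m - (t.toNat + 1)]'(by omega) with hpdef
    have hpmem : p ∈ occL s x (k+1) := List.getElem_mem _
    have hpk : p < k + 1 := (occL_mem hpmem).1
    have hpx : s.getD p 0 = x := (occL_mem hpmem).2
    have hcp : cnt s x p (k+1) = t.toNat + 1 := by
      have := cnt_at_index s x (hi := k+1) (k := m - (t.toNat + 1)) (by omega)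
      rw [← hpdef] at this
      omega
    have hcp1 : cnt s x (p+1) (k+1) = t.toNat := by
      have := cnt_cons s x hpk
      rw [hpx] at this
      rw [if_pos rfl] at this
      omega
    rw [if_pos (by simpa using hgt), hpy]
    by_cases hc : (cnt s x lN (k+1) : Int) ≤ t
    · -- window still valid: left pointer stays
      have hplN : p < lN := by
        by_contra hge
        have := cnt_anti s x (l := lN) (l' := p) (hi := k+1) (by omega)
        omega
      have hleast : leastL s x t lN (k+1) = lN :=
        leastL_eq_of s x t (le_refl lN) (by omega) hc (by omega)
      rw [hleast]
      have : (p : Int) + 1 ≤ (lN : Int) := by exact_mod_cast hplN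
      omega
    · -- window overflows by exactly one: jump to p+1
      push_neg at hc
      have hle1 : cnt s x lN (k+1) ≤ cnt s x lN k + 1 := by
        rw [cnt_succ_hi s x hlN, hx]
        split_ifs <;> omega
      have hceq : (cnt s x lN (k+1) : Int) = t + 1 := by omega
      have hlNp : lN ≤ p := by
        by_contra hlt
        have := cnt_anti s x (l := p + 1) (l' := lN) (hi := k+1) (by omega)
        omega
      have hleast : leastL s x t lN (k+1) = p + 1 := by
        apply leastL_eq_of s x t (by omega) (by omega) (by rw [hcp1]; omega)
        intro j hj hjp hle
        have := cnt_anti s x (l := j) (l' := p) (hi := k+1) (by omega)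
        omega
      rw [hleast]
      push_cast
      omega
  · -- fewer than t+1 occurrences anywhere: left pointer stays
    rw [if_neg (by simpa using hgt)]
    have hc : (cnt s x lN (k+1) : Int) ≤ t := by
      have := cnt_anti s x (l := 0) (l' := lN) (hi := k+1) (Nat.zero_le _)
      omega
    rw [leastL_eq_of s x t (le_refl lN) (by omega) hc (by omega)]

lemma main_inv (s : List Int) (t : Int) (ht : 0 ≤ t) :
    ∀ k, k ≤ s.length →
    ∃ lN : Nat, lN ≤ k ∧
      ((PySem.List.pyRange 0 (k : Int) 1).foldl (solutionStep s t s.length)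
        (0, PySem.Dict.empty, 0)).1 = (lN : Int) ∧
      ((PySem.List.enumerate (s.take k)).foldl (solutionAltStep t)
        (0, PySem.Dict.empty, 0)).1 = (lN : Int) ∧
      ((PySem.List.pyRange 0 (k : Int) 1).foldl (solutionStep s t s.length)
        (0, PySem.Dict.empty, 0)).2.2 =
      ((PySem.List.enumerate (s.take k)).foldl (solutionAltStep t)
        (0, PySem.Dict.empty, 0)).2.2 ∧
      (∀ v, ((PySem.List.pyRange 0 (k : Int) 1).foldl (solutionStep s t s.length)
        (0, PySem.Dict.empty, 0)).2.1.getD v 0 = (cnt s v lN k : Int)) ∧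
      (∀ v, (cnt s v lN k : Int) ≤ t) ∧
      (∀ v, ((PySem.List.enumerate (s.take k)).foldl (solutionAltStep t)
        (0, PySem.Dict.empty, 0)).2.1.getD v [] = (occL s v k).map (fun i : Nat => (i : Int))) := by
  intro k
  induction k with
  | zero =>
    intro _
    refine ⟨0, le_refl 0, ?_, ?_, ?_, ?_, ?_, ?_⟩
    · simp [PySem.List.pyRange_one_eq_nil]
    · simp [PySem.List.enumerate_nil]
    · simp [PySem.List.pyRange_one_eq_nil, PySem.List.enumerate_nil]
    · intro v
      simp [PySem.List.pyRange_one_eq_nil, PySem.Dict.getD_empty, cnt_of_le']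
    · intro v
      simp [cnt_of_le', ht]
    · intro v
      simp [PySem.List.enumerate_nil, PySem.Dict.getD_empty, occL]
  | succ k ih =>
    intro hk1
    have hk : k < s.length := by omega
    obtain ⟨lN, hlN, hA1, hB1, hans, hfreq, hvalid, hpos⟩ := ih (by omega)
    -- the new element
    have hx : PySem.List.pyGetD s ((k : Nat) : Int) 0 = s.getD k 0 := by
      rw [PySem.List.pyGetD_natCast]
    -- unfold one step of the A-side fold
    have hrange : PySem.List.pyRange 0 (((k+1 : Nat)) : Int) 1 =
        PySem.List.pyRange 0 (k : Int) 1 ++ [(k : Int)] := by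
      have : (((k+1 : Nat)) : Int) = (k : Int) + 1 := by push_cast; ring
      rw [this, PySem.List.pyRange_one_succ_right (by positivity)]
    -- unfold one step of the B-side fold
    have htake : s.take (k+1) = s.take k ++ [s[k]] := by
      rw [List.take_succ, List.getElem?_eq_getElem hk]
      rfl
    have henum : PySem.List.enumerate (s.take (k+1)) 0 =
        PySem.List.enumerate (s.take k) 0 ++ [((k : Int), s[k])] := by
      rw [htake, enumerate_snoc]
      congr 2
      simp [List.length_take, Nat.min_eq_left (by omega : k ≤ s.length)]
    rw [hrange, henum, List.foldl_append, List.foldl_append, List.foldl_cons, List.foldl_nil,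
      List.foldl_cons, List.foldl_nil]
    -- abbreviations for the two previous states
    set PA := (PySem.List.pyRange 0 (k : Int) 1).foldl (solutionStep s t s.length)
      (0, PySem.Dict.empty, 0) with hPA
    set PB := (PySem.List.enumerate (s.take k)).foldl (solutionAltStep t)
      (0, PySem.Dict.empty, 0) with hPB
    set x := s.getD k 0 with hxdef
    -- count-map invariant after the increment
    have hfreq1 : ∀ v, (PA.2.1.insert x (PA.2.1.getD x 0 + 1)).getD v 0 =
        (cnt s v lN (k+1) : Int) := by
      intro v
      rw [PySem.Dict.getD_insert, cnt_succ_hi s v hlN]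
      by_cases hv : v = x
      · subst hv
        rw [if_pos rfl, hfreq x, if_pos hxdef.symm]
        push_cast
        ring
      · rw [if_neg hv, hfreq v, if_neg (fun hh => hv (hxdef ▸ hh.symm))]
        push_cast
        ring
    have hshrink := shrink_spec s t x ht (hi := k+1) (by omega) (s.length + 1) lN
      (PA.2.1.insert x (PA.2.1.getD x 0 + 1)) (by omega) (by omega) hfreq1
    set lN' := leastL s x t lN (k+1) with hlN'
    have hbounds := leastL_bounds s x t lN (k+1)
    -- the B-side occurrence list is the occurrence list of x up to k+1
    have hocc : PB.2.1.getD x [] ++ [(k : Int)] =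
        (occL s x (k+1)).map (fun i : Nat => (i : Int)) := by
      rw [hpos x, occL_succ, if_pos hxdef.symm, List.map_append]
      rfl
    -- B's jump equals A's shrink result
    have hjump := jump_eq_least s x t ht hlN hxdef.symm (hvalid x)
    -- step results
    have hub : lN' ≤ k + 1 := by rw [hlN']; omega
    have hlb : lN ≤ lN' := by rw [hlN']; omega
    refine ⟨lN', hub, ?_, ?_, ?_, ?_, ?_, ?_⟩
    · -- A's left pointer
      simp only [solutionStep, hA1, hx]
      exact hshrink.1
    · -- B's left pointer
      simp only [solutionAltStep, hB1]
      have hrv2 : s[k] = x := by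
        rw [hxdef, List.getD, List.getElem?_eq_getElem hk]
        rfl
      rw [hrv2, hocc]
      exact hjump
    · -- equal answers
      simp only [solutionStep, solutionAltStep, hA1, hB1, hx]
      have hrv2 : s[k] = x := by
        rw [hxdef, List.getD, List.getElem?_eq_getElem hk]
        rfl
      rw [hrv2, hocc, hans, hshrink.1, hjump]
    · -- the count map tracks the new window
      intro v
      simp only [solutionStep, hA1, hx]
      exact hshrink.2 v
    · -- the new window is valid
      intro v
      by_cases hv : v = x
      · subst hv
        exact leastL_cnt_le s x t ht lN (k+1)
      · rcases Nat.lt_or_ge lN' (k+1) with hlt | hge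
        · have h1 : cnt s v lN' (k+1) = cnt s v lN' k := by
            rw [cnt_succ_hi s v (by omega), if_neg (fun hh => hv (hxdef ▸ hh.symm))]
            omega
          have h2 := cnt_anti s v (l := lN) (l' := lN') (hi := k) (by omega)
          have h3 := hvalid v
          rw [h1]
          omega
        · rw [cnt_of_le' s v (by omega)]
          exact ht
    · -- the positions map tracks all occurrences
      intro v
      simp only [solutionAltStep, hB1]
      have hrv2 : s[k] = x := by
        rw [hxdef, List.getD, List.getElem?_eq_getElem hk]
        rfl
      rw [hrv2, PySem.Dict.getD_insert]
      by_cases hv : v = x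
      · subst hv
        rw [if_pos rfl, hocc]
      · rw [if_neg hv, hpos v, occL_succ, if_neg (fun hh => hv (hxdef ▸ hh.symm))]
        simp

-- ===== VERDICT (by name: the statement is the Claim_ definition above) =====
theorem solution_spec : Claim_equal_solution := by
  intro salesData frequencyThreshold _ hpre
  rcases hpre with rfl | ht
  · rfl
  · obtain ⟨lN, _, _, _, hans, _⟩ :=
      main_inv salesData frequencyThreshold ht salesData.length (le_refl _)
    show solution salesData frequencyThreshold = solution_alt salesData frequencyThreshold
    unfold solution solution_alt
    conv_rhs => rw [← List.take_length (l := salesData)]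
    exact hans
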